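-- pv_equiv track=rewrite | github.com/jun311k/SparseTransformerArchitecture | spt_col.py | partition_columns
-- ===== SOURCE A (Python) =====
-- def partition_columns(n_cols, n_partitions): # 1000개의 col과 8개의 PEArray(파티션)이 있다 가정
--     sizes = [(n_cols + i) // n_partitions for i in range(n_partitions)] #[125, 125, ... 125] 총 8개 요소소
--     parts = []
--     start = 0
--     for i in sizes:
--         parts.append(list(range(start, start + i))) # [[0, 1, ..., 124], [125, ..., 249], ..., [875, ..., 999]]
--         start += i
--     return parts
-- ===== SOURCE B (Python) =====
-- def partition_columns(n_cols, n_partitions):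
--     if n_partitions <= 0:
--         return []
--     q, r = divmod(n_cols, n_partitions)
--     def b(k):
--         return k * q + max(0, k - (n_partitions - r))
--     return [list(range(b(k), b(k + 1))) for k in range(n_partitions)]
-- ===== Notes on version B (the rewrite author's own statement) =====
-- stated objective: simpler
-- what changed: Replaces A's sizes list plus running start accumulator with closed-form partition boundaries b(k) = k*q + max(0, k-(p-r)) from a single divmod, building each group directly as range(b(k), b(k+1)).
import Mathlib
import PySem

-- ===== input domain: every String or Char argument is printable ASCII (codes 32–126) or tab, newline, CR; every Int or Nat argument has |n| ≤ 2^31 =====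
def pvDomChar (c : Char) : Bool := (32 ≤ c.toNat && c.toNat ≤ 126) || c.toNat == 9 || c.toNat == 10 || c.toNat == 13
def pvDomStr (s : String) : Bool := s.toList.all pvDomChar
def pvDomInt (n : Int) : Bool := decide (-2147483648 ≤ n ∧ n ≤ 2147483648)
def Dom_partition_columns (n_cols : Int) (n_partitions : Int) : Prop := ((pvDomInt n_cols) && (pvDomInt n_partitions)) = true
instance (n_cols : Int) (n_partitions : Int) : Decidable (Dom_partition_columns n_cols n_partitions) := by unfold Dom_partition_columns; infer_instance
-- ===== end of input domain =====

-- B replaces the running size/start accumulation by closed-form partition boundaries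
-- b(k) = k*q + max(0, k-(p-r)) from a single divmod; objective: simpler (not measured faster).

-- ===== PORT A =====
def partition_columns (n_cols : Int) (n_partitions : Int) : List (List Int) :=
  let sizes := (PySem.List.pyRange 0 n_partitions 1).map
    (fun i => PySem.Int.floordiv (n_cols + i) n_partitions)
  let res := sizes.foldl
    (fun (st : List (List Int) × Int) i =>
      (st.1 ++ [PySem.List.pyRange st.2 (st.2 + i) 1], st.2 + i))
    ([], 0)
  res.1

-- ===== PORT B =====
def partition_columns_alt (n_cols : Int) (n_partitions : Int) : List (List Int) :=
  if n_partitions ≤ 0 then []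
  else
    let q := PySem.Int.floordiv n_cols n_partitions
    let r := PySem.Int.mod n_cols n_partitions
    let b := fun (k : Int) => k * q + max 0 (k - (n_partitions - r))
    (PySem.List.pyRange 0 n_partitions 1).map
      (fun k => PySem.List.pyRange (b k) (b (k + 1)) 1)

-- ===== PRECONDITION & SPEC =====
def Spec_partition_columns (n_cols : Int) (n_partitions : Int) (out : List (List Int)) : Prop := out = partition_columns_alt n_cols n_partitions
instance (n_cols : Int) (n_partitions : Int) (out : List (List Int)) : Decidable (Spec_partition_columns n_cols n_partitions out) := by unfold Spec_partition_columns; infer_instance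

-- ===== CLAIM (what is proved, stated in full; the proofs are below) =====
def Claim_equal_partition_columns : Prop := ∀ (n_cols : Int) (n_partitions : Int), Dom_partition_columns n_cols n_partitions → Spec_partition_columns n_cols n_partitions (partition_columns n_cols n_partitions)

-- ===== LEMMAS AND PROOFS =====

-- boundary function b
def pvB (n p k : Int) : Int :=
  k * PySem.Int.floordiv n p + max 0 (k - (p - PySem.Int.mod n p))

-- key step: b(k) + size(k) = b(k+1) for 0 ≤ k < p, p > 0
lemma pvB_step (n p k : Int) (hp : 0 < p) (hk0 : 0 ≤ k) (hkp : k < p) :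
    pvB n p k + PySem.Int.floordiv (n + k) p = pvB n p (k + 1) := by
  have hq := PySem.Int.floordiv_mul_add_mod n p
  have hr0 := PySem.Int.mod_nonneg n hp
  have hrp := PySem.Int.mod_lt n hp
  set q := PySem.Int.floordiv n p with hqdef
  set r := PySem.Int.mod n p with hrdef
  have hdiv : PySem.Int.floordiv (n + k) p
      = q + (if p ≤ r + k then 1 else 0) := by
    rw [PySem.Int.floordiv_eq_iff_of_pos hp]
    split_ifs with h <;> constructor <;> nlinarith
  unfold pvB
  rw [← hqdef, ← hrdef, hdiv]
  rcases le_or_gt p (r + k) with h | h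
  · rw [if_pos h]
    have h1 : max 0 (k - (p - r)) = k - (p - r) := by omega
    have h2 : max 0 (k + 1 - (p - r)) = k + 1 - (p - r) := by omega
    rw [h1, h2]; ring
  · rw [if_neg (by omega)]
    have h1 : max 0 (k - (p - r)) = 0 := by omega
    have h2 : max 0 (k + 1 - (p - r)) = 0 := by omega
    rw [h1, h2]; ring

-- loop invariant: folding A's body over sizes for indices k..p-1 starting at b(k)
lemma pv_loop (n p : Int) (hp : 0 < p) :
    ∀ (m : Nat) (k : Int) (acc : List (List Int)), 0 ≤ k → k + m = p →
    List.foldl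
      (fun (st : List (List Int) × Int) i =>
        (st.1 ++ [PySem.List.pyRange st.2 (st.2 + i) 1], st.2 + i))
      (acc, pvB n p k)
      ((PySem.List.pyRange k p 1).map (fun i => PySem.Int.floordiv (n + i) p))
    = (acc ++ (PySem.List.pyRange k p 1).map
        (fun i => PySem.List.pyRange (pvB n p i) (pvB n p (i + 1)) 1), pvB n p p) := by
  intro m
  induction m with
  | zero =>
    intro k acc hk0 hkp
    have hk : k = p := by omega
    subst hk
    rw [PySem.List.pyRange_one_eq_nil le_rfl]
    simp
  | succ m ih =>
    intro k acc hk0 hkp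
    have hklt : k < p := by omega
    rw [PySem.List.pyRange_one_cons hklt]
    simp only [List.map_cons, List.foldl_cons]
    rw [pvB_step n p k hp hk0 hklt]
    rw [ih (k + 1) (acc ++ [PySem.List.pyRange (pvB n p k) (pvB n p (k + 1)) 1])
        (by omega) (by omega)]
    simp

lemma pvB_zero (n p : Int) (hp : 0 < p) : pvB n p 0 = 0 := by
  have hrp := PySem.Int.mod_lt n hp
  unfold pvB
  have : max 0 (0 - (p - PySem.Int.mod n p)) = 0 := by omega
  rw [this]; ring

-- ===== VERDICT (by name: the statement is the Claim_ definition above) =====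
theorem partition_columns_spec : Claim_equal_partition_columns := by
  intro n p _
  unfold Spec_partition_columns partition_columns partition_columns_alt
  by_cases hp : p ≤ 0
  · rw [if_pos hp, PySem.List.pyRange_one_eq_nil (by omega)]
    simp
  · rw [if_neg hp]
    rw [not_le] at hp
    have h0 := pvB_zero n p hp
    have := pv_loop n p hp p.toNat 0 [] le_rfl (by omega)
    rw [h0] at this
    simp only [this]
    simp [pvB]
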